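-- pv_equiv track=rewrite | github.com/spencerduncan/redshipblueship | tools/lib/code_extractor.py | _find_matching_open_brace
-- ===== SOURCE A (Python) =====
-- def _find_matching_open_brace(content: str, close_pos: int) -> int:
--     """
--     Find the opening brace that matches a closing brace, searching backwards.
--
--     Args:
--         content: The source code string
--         close_pos: Position of the closing brace '}'
--
--     Returns:
--         Position of the matching opening brace, or -1 if not found
--     """
--     if close_pos < 0 or content[close_pos] != '}':
--         return -1
--
--     depth = 1
--     pos = close_pos - 1
--
--     while pos >= 0 and depth > 0:
--         char = content[pos]
--
--         # Note: We're going backwards, so we can't easily skip comments/strings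
--         # in the forward direction. For simplicity, just track braces.
--         # This works for most struct/union definitions.
--         if char == '}':
--             depth += 1
--         elif char == '{':
--             depth -= 1
--
--         pos -= 1
--
--     if depth == 0:
--         return pos + 1
--     return -1
-- ===== SOURCE B (Python) =====
-- def _find_matching_open_brace(content: str, close_pos: int) -> int:
--     if close_pos < 0 or content[close_pos] != '}':
--         return -1
--     stack = []
--     for i in range(close_pos):
--         c = content[i]
--         if c == '{':
--             stack.append(i)
--         elif c == '}' and stack:
--             stack.pop()
--     return stack[-1] if stack else -1
-- ===== Notes on version B (the rewrite author's own statement) =====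
-- stated objective: alternative
-- what changed: Replaced A's backward scan with a depth counter by a single forward pass over content[0:close_pos] maintaining a stack of indices of unmatched '{', returning the stack top.
import Mathlib
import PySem

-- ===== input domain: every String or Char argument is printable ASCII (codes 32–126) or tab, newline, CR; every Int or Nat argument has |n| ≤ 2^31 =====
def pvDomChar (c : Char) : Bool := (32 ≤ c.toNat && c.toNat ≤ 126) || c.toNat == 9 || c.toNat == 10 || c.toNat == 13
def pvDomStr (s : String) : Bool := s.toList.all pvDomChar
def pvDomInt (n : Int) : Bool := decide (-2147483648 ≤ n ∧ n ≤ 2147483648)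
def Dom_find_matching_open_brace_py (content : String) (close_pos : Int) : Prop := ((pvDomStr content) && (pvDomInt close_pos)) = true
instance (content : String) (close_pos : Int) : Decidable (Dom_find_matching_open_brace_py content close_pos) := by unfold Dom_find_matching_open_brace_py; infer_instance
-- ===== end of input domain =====

-- B replaces A's backward depth-counting scan with a forward stack of '{' indices (alternative algorithm, same O(n) cost).

-- ===== PORT A =====
-- A's while loop: pos runs from close_pos-1 down to 0 while depth > 0; here j = pos+1 (as a Nat),
-- so aLoop cs j d is the loop entered with pos = j-1 and depth = d; depth = 0 exits and returns pos+1 = j.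
def aLoop (cs : List Char) : Nat → Nat → Int
  | j, 0 => (j : Int)
  | 0, _ + 1 => -1
  | j + 1, d + 1 =>
      let c := cs.getD j ' '
      if c = '}' then aLoop cs j (d + 2)
      else if c = '{' then aLoop cs j d
      else aLoop cs j (d + 1)

def find_matching_open_brace_py (content : String) (close_pos : Int) : Int :=
  if close_pos < 0 then -1
  else
    match PySem.Str.pyGet? content close_pos with
    | none => -1   -- Python raises IndexError here; excluded by Pre_
    | some c =>
      if c ≠ '}' then -1
      else aLoop content.toList close_pos.toNat 1

-- ===== PORT B =====
-- forward scan of content[0:close_pos] keeping a stack (head = top) of indices of unmatched '{'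
def bStack (cs : List Char) (n : Nat) : List Nat :=
  (List.range n).foldl
    (fun st i =>
      let c := cs.getD i ' '
      if c = '{' then i :: st
      else if c = '}' then st.tail
      else st) []

def find_matching_open_brace_py_alt (content : String) (close_pos : Int) : Int :=
  if close_pos < 0 then -1
  else
    match PySem.Str.pyGet? content close_pos with
    | none => -1   -- Python raises IndexError here; excluded by Pre_
    | some c =>
      if c ≠ '}' then -1
      else
        match bStack content.toList close_pos.toNat with
        | [] => -1
        | t :: _ => (t : Int)

-- ===== PRECONDITION & SPEC =====
-- Pre_ excludes only close_pos ≥ len(content), where both A and B raise IndexError on content[close_pos].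
def Pre_find_matching_open_brace_py (content : String) (close_pos : Int) : Prop :=
  close_pos < (content.toList.length : Int)
instance (content : String) (close_pos : Int) : Decidable (Pre_find_matching_open_brace_py content close_pos) := by unfold Pre_find_matching_open_brace_py; infer_instance

def pvWitness_find_matching_open_brace_py : String × Int := ("{a{b}c}", 6)

def Spec_find_matching_open_brace_py (content : String) (close_pos : Int) (out : Int) : Prop := out = find_matching_open_brace_py_alt content close_pos
instance (content : String) (close_pos : Int) (out : Int) : Decidable (Spec_find_matching_open_brace_py content close_pos out) := by unfold Spec_find_matching_open_brace_py; infer_instance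

-- ===== CLAIM (what is proved, stated in full; the proofs are below) =====
def Claim_equal_find_matching_open_brace_py : Prop := ∀ (content : String) (close_pos : Int), Dom_find_matching_open_brace_py content close_pos → Pre_find_matching_open_brace_py content close_pos → Spec_find_matching_open_brace_py content close_pos (find_matching_open_brace_py content close_pos)

-- ===== LEMMAS AND PROOFS =====

-- unfold one step of the forward stack
theorem bStack_succ (cs : List Char) (j : Nat) :
    bStack cs (j + 1) =
      (let c := cs.getD j ' '
       if c = '{' then j :: bStack cs j
       else if c = '}' then (bStack cs j).tail
       else bStack cs j) := by
  simp only [bStack, List.range_succ, List.foldl_append, List.foldl_cons, List.foldl_nil]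

-- core invariant: the backward scan at depth d+1 lands on the d-th entry of the forward stack
theorem aLoop_eq_bStack (cs : List Char) :
    ∀ (j d : Nat),
      aLoop cs j (d + 1) =
        (match (bStack cs j)[d]? with
         | some t => (t : Int)
         | none => -1) := by
  intro j
  induction j with
  | zero =>
    intro d
    simp [aLoop, bStack]
  | succ j ih =>
    intro d
    rw [bStack_succ]
    simp only [List.getD]
    by_cases h1 : cs[j]?.getD ' ' = '{'
    · cases d with
      | zero => simp [aLoop, List.getD, h1]
      | succ d' =>
        have : aLoop cs (j + 1) (d' + 1 + 1) = aLoop cs j (d' + 1) := by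
          simp [aLoop, List.getD, h1]
        rw [this, ih d']
        simp [h1]
    · by_cases h2 : cs[j]?.getD ' ' = '}'
      · have : aLoop cs (j + 1) (d + 1) = aLoop cs j (d + 2) := by
          simp [aLoop, List.getD, h2]
        rw [this, ih (d + 1)]
        simp [h2, List.getElem?_tail]
      · have : aLoop cs (j + 1) (d + 1) = aLoop cs j (d + 1) := by
          simp [aLoop, List.getD, h1, h2]
        rw [this, ih d]
        simp [h1, h2]

-- ===== VERDICT (by name: the statement is the Claim_ definition above) =====
theorem find_matching_open_brace_py_spec : Claim_equal_find_matching_open_brace_py := by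
  unfold Claim_equal_find_matching_open_brace_py
  intro content close_pos _ _
  unfold Spec_find_matching_open_brace_py
  unfold find_matching_open_brace_py find_matching_open_brace_py_alt
  by_cases hneg : close_pos < 0
  · simp [hneg]
  · simp only [hneg, if_false]
    cases PySem.Str.pyGet? content close_pos with
    | none => rfl
    | some c =>
      by_cases hc : c = '}'
      · simp only [hc, ne_eq, not_true_eq_false, if_false]
        rw [aLoop_eq_bStack]
        cases h : (bStack content.toList close_pos.toNat)[0]? with
        | none =>
          cases hs : bStack content.toList close_pos.toNat with
          | nil => simp
          | cons t r => rw [hs] at h; simp at h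
        | some t =>
          cases hs : bStack content.toList close_pos.toNat with
          | nil => rw [hs] at h; simp at h
          | cons t' r => rw [hs] at h; simp at h; simp [h]
      · simp [hc]
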